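-- pv_equiv track=rewrite | github.com/programminglounge/Rosalind | LGIS.py | findsubarraymax
-- ===== SOURCE A (Python) =====
-- def findsubarraymax(array, start, end, amount):
--   subarray = []
--   for i in range(start, end):
--     if (array[i] < amount):
--       elements = [array[i]]
--       z = findsubarraymax(array, i, end, array[i])
--       if (len(z) != 0):
--         for j in range(len(z)):
--           elements = [array[i]]
--           for k in range(len(z[j])):
--             elements.append(z[j][k])
--           subarray.append(elements)
--       else:
--         subarray.append(elements)
--   return subarray
-- ===== SOURCE B (Python) =====
-- def findsubarraymax(array, start, end, amount):
--     # Bottom-up DP: dp[i] = all maximal strictly-decreasing subsequences starting at index i,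
--     # computed once per index instead of A's exponential re-enumeration. Only indices with
--     # array[i] < amount can ever be reached (values along a chain only decrease), so only
--     # those entries are built.
--     dp = {}
--     for i in reversed(range(start, end)):
--         if array[i] < amount:
--             conts = [s for j in range(i + 1, end) if array[j] < array[i] for s in dp[j]]
--             dp[i] = [[array[i]] + s for s in conts] if conts else [[array[i]]]
--     return [s for i in range(start, end) if array[i] < amount for s in dp[i]]
-- ===== Notes on version B (the rewrite author's own statement) =====
-- stated objective: alternative
-- what changed: B replaces A's top-down naive re-enumeration (a fresh recursive call per index, recomputing suffix results per caller) with a bottom-up memo table dp[i] of all maximal strictly-decreasing subsequences starting at i, built once right-to-left over the indices with array[i] < amount, then concatenated for the start indices; it trades recursion for an explicit table.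
import Mathlib
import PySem

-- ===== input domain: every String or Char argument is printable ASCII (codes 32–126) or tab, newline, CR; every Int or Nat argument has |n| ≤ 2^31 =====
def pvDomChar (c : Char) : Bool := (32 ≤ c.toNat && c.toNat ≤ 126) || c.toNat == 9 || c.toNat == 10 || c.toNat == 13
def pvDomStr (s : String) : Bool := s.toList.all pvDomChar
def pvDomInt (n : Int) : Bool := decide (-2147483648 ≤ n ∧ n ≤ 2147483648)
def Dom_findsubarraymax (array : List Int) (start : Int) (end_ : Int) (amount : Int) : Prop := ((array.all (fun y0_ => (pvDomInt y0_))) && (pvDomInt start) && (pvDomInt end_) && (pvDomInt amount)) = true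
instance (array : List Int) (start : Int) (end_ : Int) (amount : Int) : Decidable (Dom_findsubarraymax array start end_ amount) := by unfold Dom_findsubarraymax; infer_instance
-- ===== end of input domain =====

-- B builds the same list bottom-up with an explicit memo table dp[i] (each index computed
-- once) instead of A's top-down naive re-enumeration; an alternative decomposition.


-- ===== PORT A =====
-- termination helper for the port's recursion (cited in decreasing_by)
theorem pvCountLt (array : List Int) (start end_ amount : Int) (h : start < end_)
    (hlt : (PySem.List.pyGet? array start).getD 0 < amount) :
    ((PySem.List.pyRange start end_ 1).countP
        (fun i => decide ((PySem.List.pyGet? array i).getD 0 < (PySem.List.pyGet? array start).getD 0)))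
      < ((PySem.List.pyRange start end_ 1).countP
        (fun i => decide ((PySem.List.pyGet? array i).getD 0 < amount))) := by
  rw [PySem.List.pyRange_one_cons h]
  simp only [List.countP_cons, decide_eq_true_eq, lt_self_iff_false, if_false, hlt, if_true]
  have hmono : ((PySem.List.pyRange (start+1) end_ 1).countP
        (fun i => decide ((PySem.List.pyGet? array i).getD 0 < (PySem.List.pyGet? array start).getD 0)))
      ≤ ((PySem.List.pyRange (start+1) end_ 1).countP
        (fun i => decide ((PySem.List.pyGet? array i).getD 0 < amount))) := by
    apply List.countP_mono_left
    intro j _ hj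
    simp only [decide_eq_true_eq] at hj ⊢
    exact lt_trans hj hlt
  omega

theorem pvCountMono (array : List Int) (start end_ amount : Int) (h : start < end_) :
    ((PySem.List.pyRange (start+1) end_ 1).countP
        (fun i => decide ((PySem.List.pyGet? array i).getD 0 < amount)))
      ≤ ((PySem.List.pyRange start end_ 1).countP
        (fun i => decide ((PySem.List.pyGet? array i).getD 0 < amount))) := by
  rw [PySem.List.pyRange_one_cons h]
  simp only [List.countP_cons]
  omega

-- literal port of A; array[i] is PySem.List.pyGet? (Pre_ guarantees the index is in range,
-- so the .getD 0 default is never the value Python would not compute)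
def findsubarraymax (array : List Int) (start : Int) (end_ : Int) (amount : Int) : List (List Int) :=
  if h : start < end_ then
    (if hlt : (PySem.List.pyGet? array start).getD 0 < amount then
      let ai := (PySem.List.pyGet? array start).getD 0
      let z := findsubarraymax array start end_ ai
      if z.length ≠ 0 then z.map (fun s => ai :: s) else [[ai]]
     else [])
    ++ findsubarraymax array (start + 1) end_ amount
  else []
termination_by (end_ - start).toNat +
  ((PySem.List.pyRange start end_ 1).countP
    (fun i => decide ((PySem.List.pyGet? array i).getD 0 < amount)))
decreasing_by
  · have := pvCountLt array start end_ amount h hlt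
    omega
  · have := pvCountMono array start end_ amount h
    omega

-- ===== PORT B =====
-- the body of B's right-to-left table-building loop (only indices with array[i] < amount get an entry)
def pvStep (array : List Int) (end_ amount : Int)
    (memo : PySem.Dict Int (List (List Int))) (i : Int) : PySem.Dict Int (List (List Int)) :=
  if (PySem.List.pyGet? array i).getD 0 < amount then
    let ai := (PySem.List.pyGet? array i).getD 0
    let conts := ((PySem.List.pyRange (i + 1) end_ 1).map
        (fun j => if (PySem.List.pyGet? array j).getD 0 < ai then memo.getD j [] else [])).flatten
    memo.insert i (if conts ≠ [] then conts.map (fun s => ai :: s) else [[ai]])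
  else memo

-- literal port of B (Source B): dp[j] is always present when read, so getD [] is exact
def findsubarraymax_alt (array : List Int) (start : Int) (end_ : Int) (amount : Int) : List (List Int) :=
  let dp := ((PySem.List.pyRange start end_ 1).reverse).foldl (pvStep array end_ amount) PySem.Dict.empty
  ((PySem.List.pyRange start end_ 1).map
    (fun i => if (PySem.List.pyGet? array i).getD 0 < amount then dp.getD i [] else [])).flatten

-- ===== PRECONDITION & SPEC =====
-- Pre_ excludes exactly the inputs on which Python A raises IndexError: some scanned index
-- start ≤ i < end_ is out of range (pyGet? = none).
def Pre_findsubarraymax (array : List Int) (start : Int) (end_ : Int) (amount : Int) : Prop :=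
  start < end_ → (-(array.length : Int) ≤ start ∧ end_ ≤ (array.length : Int))
instance (array : List Int) (start : Int) (end_ : Int) (amount : Int) : Decidable (Pre_findsubarraymax array start end_ amount) := by unfold Pre_findsubarraymax; infer_instance

def pvWitness_findsubarraymax : List Int × Int × Int × Int := ([3, 1, 2], 0, 3, 5)

def Spec_findsubarraymax (array : List Int) (start : Int) (end_ : Int) (amount : Int) (out : List (List Int)) : Prop := out = findsubarraymax_alt array start end_ amount
instance (array : List Int) (start : Int) (end_ : Int) (amount : Int) (out : List (List Int)) : Decidable (Spec_findsubarraymax array start end_ amount out) := by unfold Spec_findsubarraymax; infer_instance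

-- ===== CLAIM (what is proved, stated in full; the proofs are below) =====
def Claim_equal_findsubarraymax : Prop := ∀ (array : List Int) (start : Int) (end_ : Int) (amount : Int), Dom_findsubarraymax array start end_ amount → Pre_findsubarraymax array start end_ amount → Spec_findsubarraymax array start end_ amount (findsubarraymax array start end_ amount)

-- ===== LEMMAS AND PROOFS =====

-- the per-index value A's recursion produces at index i (proof-side characterisation)
def pvFA (array : List Int) (end_ i : Int) : List (List Int) :=
  let ai := (PySem.List.pyGet? array i).getD 0
  let z := findsubarraymax array i end_ ai
  if z.length ≠ 0 then z.map (fun s => ai :: s) else [[ai]]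

theorem pvExpandA (array : List Int) (end_ : Int) :
    ∀ (n : Nat) (s amt : Int), (end_ - s).toNat = n →
      findsubarraymax array s end_ amt =
        ((PySem.List.pyRange s end_ 1).map
          (fun i => if (PySem.List.pyGet? array i).getD 0 < amt then pvFA array end_ i else [])).flatten := by
  intro n
  induction n with
  | zero =>
    intro s amt hn
    have hle : end_ ≤ s := by omega
    rw [findsubarraymax, PySem.List.pyRange_one_eq_nil hle]
    simp [not_lt.mpr hle]
  | succ n ih =>
    intro s amt hn
    have h : s < end_ := by omega
    rw [findsubarraymax, dif_pos h, ih (s + 1) amt (by omega),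
      PySem.List.pyRange_one_cons h]
    simp only [List.map_cons, List.flatten_cons, pvFA]
    by_cases hlt : (PySem.List.pyGet? array s).getD 0 < amt
    · rw [dif_pos hlt, if_pos hlt]
    · rw [dif_neg hlt, if_neg hlt, List.nil_append]

theorem pvDpInv (array : List Int) (end_ amount : Int) :
    ∀ (n : Nat) (s : Int), (end_ - s).toNat = n →
      ∀ j, s ≤ j → j < end_ → (PySem.List.pyGet? array j).getD 0 < amount →
        (((PySem.List.pyRange s end_ 1).reverse).foldl (pvStep array end_ amount)
            PySem.Dict.empty).getD j [] = pvFA array end_ j := by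
  intro n
  induction n with
  | zero =>
    intro s hn j hsj hje _
    omega
  | succ n ih =>
    intro s hn j hsj hje hjam
    have h : s < end_ := by omega
    rw [PySem.List.pyRange_one_cons h]
    simp only [List.reverse_cons, List.foldl_append, List.foldl_cons, List.foldl_nil]
    set memo := ((PySem.List.pyRange (s+1) end_ 1).reverse).foldl (pvStep array end_ amount)
        PySem.Dict.empty with hmemo
    have ihm : ∀ j', s + 1 ≤ j' → j' < end_ → (PySem.List.pyGet? array j').getD 0 < amount →
        memo.getD j' [] = pvFA array end_ j' := by
      intro j' h1 h2 h3
      exact ih (s + 1) (by omega) j' h1 h2 h3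
    rcases eq_or_lt_of_le hsj with hEq | hGt
    · -- j = s : the inserted value is pvFA array end_ s
      subst hEq
      show (pvStep array end_ amount memo s).getD s [] = pvFA array end_ s
      unfold pvStep
      rw [if_pos hjam, PySem.Dict.getD_insert_self]
      have hconts :
          ((PySem.List.pyRange (s + 1) end_ 1).map
            (fun j' => if (PySem.List.pyGet? array j').getD 0 < (PySem.List.pyGet? array s).getD 0
              then memo.getD j' [] else [])).flatten
          = findsubarraymax array s end_ ((PySem.List.pyGet? array s).getD 0) := by
        rw [pvExpandA array end_ (end_ - s).toNat s ((PySem.List.pyGet? array s).getD 0) rfl,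
          PySem.List.pyRange_one_cons hje]
        simp only [List.map_cons, List.flatten_cons, lt_self_iff_false, if_false, List.nil_append]
        congr 1
        apply List.map_congr_left
        intro x hx
        rw [PySem.List.mem_pyRange_one] at hx
        by_cases hc : (PySem.List.pyGet? array x).getD 0 < (PySem.List.pyGet? array s).getD 0
        · rw [if_pos hc, if_pos hc, ihm x hx.1 hx.2 (lt_trans hc hjam)]
        · rw [if_neg hc, if_neg hc]
      rw [hconts]
      unfold pvFA
      by_cases hz : findsubarraymax array s end_ ((PySem.List.pyGet? array s).getD 0) = []
      · rw [if_neg (by simp [hz]), if_neg (by simp [hz])]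
      · rw [if_pos hz, if_pos (by simpa [List.length_eq_zero_iff] using hz)]
    · -- j > s : the step at s (insert at s, or no-op) does not affect key j
      show (pvStep array end_ amount memo s).getD j [] = pvFA array end_ j
      unfold pvStep
      by_cases hs : (PySem.List.pyGet? array s).getD 0 < amount
      · rw [if_pos hs, PySem.Dict.getD_insert_of_ne _ _ _ (show j ≠ s by omega)]
        exact ihm j (by omega) hje hjam
      · rw [if_neg hs]
        exact ihm j (by omega) hje hjam

-- ===== VERDICT (by name: the statement is the Claim_ definition above) =====
theorem findsubarraymax_spec : Claim_equal_findsubarraymax := by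
  intro array start end_ amount _hdom _hpre
  unfold Spec_findsubarraymax findsubarraymax_alt
  rw [pvExpandA array end_ (end_ - start).toNat start amount rfl]
  congr 1
  apply List.map_congr_left
  intro i hi
  rw [PySem.List.mem_pyRange_one] at hi
  by_cases hc : (PySem.List.pyGet? array i).getD 0 < amount
  · rw [if_pos hc, if_pos hc,
      pvDpInv array end_ amount (end_ - start).toNat start rfl i hi.1 hi.2 hc]
  · rw [if_neg hc, if_neg hc]
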